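-- pv_equiv track=rewrite | github.com/rodrigorahal/advent-of-code-2021 | 15/chiton.py | propagate
-- ===== SOURCE A (Python) =====
-- def propagate(tile):
--     H, W = len(tile), len(tile[0])
--     map = [[None] * W * 5 for i in range(H)]
--     for row, risks in enumerate(tile):
--         for col, risk in enumerate(risks):
--             map[row][col] = risk
--             for j in range(1, 5):
--                 map[row][col + j * W] = propagate_risk(map[row][col + (j - 1) * W])
--     for i in range(4):
--         for row in range(H):
--             new_row = [propagate_risk(map[row + i * H][col]) for col in range(5 * W)]
--             map.append(new_row)
--     return map
--
-- def propagate_risk(risk):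
--     return risk + 1 if risk + 1 <= 9 else 1
-- ===== SOURCE B (Python) =====
-- def propagate(tile):
--     H, W = len(tile), len(tile[0])
--
--     def bump(v):
--         return v + 1 if v + 1 <= 9 else 1
--
--     def cell(r, c):
--         v = tile[r % H][c % W]
--         for _ in range(r // H + c // W):
--             v = bump(v)
--         return v
--
--     return [[cell(r, c) for c in range(5 * W)] for r in range(5 * H)]
-- ===== Notes on version B (the rewrite author's own statement) =====
-- stated objective: simpler
-- what changed: Replaces A's two-phase in-place propagation (mutating a None-initialized grid column-block by column-block, then appending transformed row blocks) with a direct comprehension computing each output cell independently by iterating the wrap-increment r//H + c//W times on the corresponding tile cell; Pre_ excludes only non-rectangular or empty tiles, on which A raises.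
import Mathlib
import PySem

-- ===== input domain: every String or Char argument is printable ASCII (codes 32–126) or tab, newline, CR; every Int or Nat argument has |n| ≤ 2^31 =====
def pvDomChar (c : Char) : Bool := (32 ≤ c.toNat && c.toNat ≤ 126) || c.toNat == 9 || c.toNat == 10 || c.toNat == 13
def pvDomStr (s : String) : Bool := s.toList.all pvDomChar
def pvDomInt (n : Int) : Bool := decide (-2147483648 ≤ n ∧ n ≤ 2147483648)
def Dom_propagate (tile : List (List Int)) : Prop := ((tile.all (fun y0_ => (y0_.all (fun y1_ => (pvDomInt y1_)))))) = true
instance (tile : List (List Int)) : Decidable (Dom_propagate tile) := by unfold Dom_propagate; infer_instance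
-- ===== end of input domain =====

-- B computes each output cell independently (iterating the wrap-increment per block offset)
-- instead of A's two-phase in-place grid propagation; return values agree on every
-- non-empty rectangular tile (exactly the inputs on which A returns).

-- ===== PORT A =====
def propagate_risk (risk : Int) : Int := if risk + 1 ≤ 9 then risk + 1 else 1

-- propagate_risk applied to a possibly still-None cell (Python raises TypeError on None; Pre_ excludes)
def propagate_riskO (o : Option Int) : Option Int := o.map propagate_risk

def propagate (tile : List (List Int)) : List (List Int) :=
  let H := tile.length
  let W := (tile.getD 0 []).length  -- tile[0]: Python raises IndexError on tile = [] (excluded by Pre_)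
  -- map = [[None] * W * 5 for i in range(H)], then the first double loop (row r mutates only row r)
  let phase1 : List (List (Option Int)) :=
    tile.map (fun risks =>
      (PySem.List.enumerate risks).foldl (fun rowL cr =>
        let col := cr.1.toNat
        let rowL := rowL.set col (some cr.2)
        (List.range 4).foldl (fun rl j =>
          rl.set (col + (j + 1) * W) (propagate_riskO (rl.getD (col + j * W) none))) rowL)
        (List.replicate (W * 5) none))
  -- for i in range(4): for row in range(H): map.append(new_row)
  let phase2 : List (List (Option Int)) :=
    (List.range 4).foldl (fun m i =>
      (List.range H).foldl (fun m row =>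
        m ++ [(List.range (5 * W)).map
          (fun col => propagate_riskO ((m.getD (row + i * H) []).getD col none))]) m) phase1
  -- under Pre_ every cell was filled in; the default of this unwrapping is never read
  phase2.map (fun r => r.map (fun o => o.getD 0))

-- ===== PORT B =====
def bump (v : Int) : Int := if v + 1 ≤ 9 then v + 1 else 1

def propagate_alt (tile : List (List Int)) : List (List Int) :=
  let H := tile.length
  let W := (tile.getD 0 []).length
  (List.range (5 * H)).map (fun r => (List.range (5 * W)).map (fun c =>
    (List.range (r / H + c / W)).foldl (fun v _ => bump v)
      ((tile.getD (r % H) []).getD (c % W) 0)))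

-- ===== PRECONDITION & SPEC =====
-- A raises IndexError on an empty tile or a row longer than the first, and TypeError
-- (propagate_risk(None)) when some row is shorter than the first; it returns exactly on
-- non-empty rectangular tiles, which is what Pre_ states.
def Pre_propagate (tile : List (List Int)) : Prop :=
  tile ≠ [] ∧ ∀ row ∈ tile, row.length = (tile.getD 0 []).length
instance (tile : List (List Int)) : Decidable (Pre_propagate tile) := by unfold Pre_propagate; infer_instance

def pvWitness_propagate : List (List Int) := [[1, 2], [8, 9]]

def Spec_propagate (tile : List (List Int)) (out : List (List Int)) : Prop := out = propagate_alt tile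
instance (tile : List (List Int)) (out : List (List Int)) : Decidable (Spec_propagate tile out) := by unfold Spec_propagate; infer_instance

-- ===== CLAIM (what is proved, stated in full; the proofs are below) =====
def Claim_equal_propagate : Prop := ∀ (tile : List (List Int)), Dom_propagate tile → Pre_propagate tile → Spec_propagate tile (propagate tile)

-- ===== LEMMAS AND PROOFS =====

-- k-fold propagate_risk
def fpow : Nat → Int → Int
  | 0, x => x
  | k + 1, x => propagate_risk (fpow k x)

-- B's per-cell loop computes fpow
theorem foldl_bump_fpow (k : Nat) (x : Int) :
    (List.range k).foldl (fun v _ => bump v) x = fpow k x := by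
  induction k with
  | zero => rfl
  | succ k ih =>
    rw [List.range_succ, List.foldl_append, ih]
    rfl

-- the tile value B reads at (i, m)
def cellv (tile : List (List Int)) (i m : Nat) : Int := (tile.getD i []).getD m 0

-- row r of the full 5x5 map, as an explicit list
def tgt (tile : List (List Int)) (H W r : Nat) : List (Option Int) :=
  (List.range (5 * W)).map (fun c => some (fpow (r / H + c / W) (cellv tile (r % H) (c % W))))

-- getElem? after set
theorem getElem?_set' {α : Type} (l : List α) (i j : Nat) (v : α) :
    (l.set i v)[j]? = if i = j ∧ i < l.length then some v else l[j]? := by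
  rw [List.getElem?_set]
  split_ifs with h1 h2 h3 <;> simp_all <;> omega

theorem getElem?_set_self' {α : Type} (l : List α) (i : Nat) (v : α) (h : i < l.length) :
    (l.set i v)[i]? = some v := by
  rw [getElem?_set']
  simp [h]

-- one column step of phase 1: fills positions n + j*W (j = 0..4), leaves all others alone
theorem colstep (W n : Nat) (x : Int) (rl : List (Option Int)) (hW : n < W) (hlen : rl.length = W * 5) :
    (List.range 4).foldl (fun rl j =>
        rl.set (n + (j + 1) * W) (propagate_riskO (rl.getD (n + j * W) none))) (rl.set n (some x)) =
      ((((rl.set n (some x)).set (n + 1 * W) (some (fpow 1 x))).set (n + 2 * W) (some (fpow 2 x))).set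
          (n + 3 * W) (some (fpow 3 x))).set (n + 4 * W) (some (fpow 4 x)) := by
  have h4 : (List.range 4) = [0, 1, 2, 3] := by decide
  rw [h4]
  simp only [List.foldl_cons, List.foldl_nil, List.getD_eq_getElem?_getD]
  norm_num
  rw [getElem?_set_self' _ _ _ (by simp [hlen]; omega)]
  simp only [Option.getD_some]
  rw [show propagate_riskO (some x) = some (fpow 1 x) from rfl]
  rw [getElem?_set_self' _ _ _ (by simp [hlen]; omega)]
  simp only [Option.getD_some]
  rw [show propagate_riskO (some (fpow 1 x)) = some (fpow 2 x) from rfl]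
  rw [getElem?_set_self' _ _ _ (by simp [hlen]; omega)]
  simp only [Option.getD_some]
  rw [show propagate_riskO (some (fpow 2 x)) = some (fpow 3 x) from rfl]
  rw [getElem?_set_self' _ _ _ (by simp [hlen]; omega)]
  simp only [Option.getD_some]
  rw [show propagate_riskO (some (fpow 3 x)) = some (fpow 4 x) from rfl]

-- the column step, described pointwise
theorem colstep_getElem (W n : Nat) (x : Int) (rl : List (Option Int)) (hW : n < W)
    (hlen : rl.length = W * 5) (c : Nat) (hc : c < 5 * W) :
    ((List.range 4).foldl (fun rl j =>
        rl.set (n + (j + 1) * W) (propagate_riskO (rl.getD (n + j * W) none))) (rl.set n (some x)))[c]? =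
      if c % W = n then some (some (fpow (c / W) x)) else rl[c]? := by
  rw [colstep W n x rl hW hlen]
  by_cases hmod : c % W = n
  · have hq5 : c / W < 5 := by
      rw [Nat.div_lt_iff_lt_mul (by omega : 0 < W)]; omega
    have hcases : c / W = 0 ∨ c / W = 1 ∨ c / W = 2 ∨ c / W = 3 ∨ c / W = 4 := by
      revert hq5; generalize c / W = q; intro hq5; omega
    simp only [getElem?_set', List.length_set, hlen]
    rcases hcases with h | h | h | h | h <;>
      (have hdm := Nat.div_add_mod c W; rw [h, hmod] at hdm; rw [h, if_pos hmod]) <;>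
      split_ifs <;> first | rfl | omega
  · have key : ∀ j : Nat, ¬(n + j * W = c) := by
      intro j h
      apply hmod
      rw [← h, Nat.add_mul_mod_self_right, Nat.mod_eq_of_lt hW]
    have keyn : ¬(n = c) := by
      have := key 0
      omega
    simp only [getElem?_set', List.length_set, hlen]
    rw [if_neg (fun h => key 4 h.1), if_neg (fun h => key 3 h.1), if_neg (fun h => key 2 h.1),
        if_neg (fun h => key 1 h.1), if_neg (fun h => keyn h.1), if_neg hmod]

-- phase-1 loop invariant
theorem phase1_inv (W : Nat) (v : Nat → Int) (rest : List Int) :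
    ∀ (n : Nat) (rl : List (Option Int)),
    n + rest.length = W →
    (∀ j (h : j < rest.length), rest[j] = v (n + j)) →
    rl.length = W * 5 →
    (∀ c, c < 5 * W → rl[c]? = some (if c % W < n then some (fpow (c / W) (v (c % W))) else none)) →
    ((PySem.List.enumerate rest (n : Int)).foldl (fun rowL cr =>
        let col := cr.1.toNat
        let rowL := rowL.set col (some cr.2)
        (List.range 4).foldl (fun rl j =>
          rl.set (col + (j + 1) * W) (propagate_riskO (rl.getD (col + j * W) none))) rowL) rl).length = W * 5 ∧
      ∀ c, c < 5 * W → ((PySem.List.enumerate rest (n : Int)).foldl (fun rowL cr =>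
        let col := cr.1.toNat
        let rowL := rowL.set col (some cr.2)
        (List.range 4).foldl (fun rl j =>
          rl.set (col + (j + 1) * W) (propagate_riskO (rl.getD (col + j * W) none))) rowL) rl)[c]? =
        some (some (fpow (c / W) (v (c % W)))) := by
  induction rest with
  | nil =>
    intro n rl hn hj hlen hinv
    simp only [List.length_nil] at hn
    simp only [PySem.List.enumerate_nil, List.foldl_nil]
    refine ⟨hlen, fun c hc => ?_⟩
    have hW : 0 < W := by omega
    have hmlt : c % W < W := Nat.mod_lt c hW
    rw [hinv c hc, if_pos (by omega)]
  | cons x rest ih =>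
    intro n rl hn hj hlen hinv
    rw [PySem.List.enumerate_cons, List.foldl_cons]
    have hnW : n < W := by
      simp only [List.length_cons] at hn; omega
    have hx : x = v n := by simpa using hj 0 (by simp)
    simp only [Int.toNat_natCast]
    have hcast : (n : Int) + 1 = ((n + 1 : Nat) : Int) := by push_cast; ring
    rw [hcast]
    apply ih (n + 1)
    · simp only [List.length_cons] at hn ⊢; omega
    · intro j h
      have h2 := hj (j + 1) (by simp; omega)
      rw [show n + (j + 1) = n + 1 + j from by omega] at h2
      simpa using h2
    · rw [colstep W n x rl hnW hlen]; simp [hlen]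
    · intro c hc
      rw [colstep_getElem W n x rl hnW hlen c hc]
      by_cases hmod : c % W = n
      · rw [if_pos hmod, hmod]
        simp [← hx, Nat.lt_succ_self]
      · rw [if_neg hmod, hinv c hc]
        by_cases hlt : c % W < n
        · rw [if_pos hlt, if_pos (by omega)]
        · rw [if_neg hlt, if_neg (by omega)]

-- a full phase-1 row, as an explicit list
theorem phase1_full (W : Nat) (risks : List Int) (hlen : risks.length = W) :
    (PySem.List.enumerate risks).foldl (fun rowL cr =>
        let col := cr.1.toNat
        let rowL := rowL.set col (some cr.2)
        (List.range 4).foldl (fun rl j =>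
          rl.set (col + (j + 1) * W) (propagate_riskO (rl.getD (col + j * W) none))) rowL)
        (List.replicate (W * 5) none) =
      (List.range (5 * W)).map (fun c => some (fpow (c / W) (risks.getD (c % W) 0))) := by
  obtain ⟨hlength, helem⟩ := phase1_inv W (fun m => risks.getD m 0) risks 0
    (List.replicate (W * 5) none) (by omega)
    (fun j h => by simp [List.getD_eq_getElem?_getD, List.getElem?_eq_getElem h])
    (by simp) (fun c hc => by simp [List.getElem?_replicate]; omega)
  simp only [Nat.cast_zero] at hlength helem
  apply List.ext_getElem?
  intro i
  by_cases hi : i < 5 * W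
  · rw [helem i hi]
    simp [List.getElem?_map, List.getElem?_range, hi]
  · rw [List.getElem?_eq_none (by rw [hlength]; omega), List.getElem?_eq_none (by simp; omega)]

-- the appended row of one phase-2 step equals the next target row
theorem phase2_step (tile : List (List Int)) (H W i s : Nat) (hH : 0 < H) (hs : s < H)
    (L : Nat) (hL : L = (i + 1) * H + s) :
    (List.range (5 * W)).map (fun col =>
        propagate_riskO ((((List.range L).map (tgt tile H W)).getD (s + i * H) []).getD col none)) =
      tgt tile H W L := by
  have hiH : (i + 1) * H = i * H + H := by ring
  have hsi : s + i * H < L := by omega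
  have hgetrow : ((List.range L).map (tgt tile H W)).getD (s + i * H) [] = tgt tile H W (s + i * H) := by
    simp [List.getD_eq_getElem?_getD, hsi]
  rw [hgetrow]
  unfold tgt
  apply List.map_congr_left
  intro col hcol
  rw [List.mem_range] at hcol
  have hgetcell : ((List.range (5 * W)).map (fun c =>
      some (fpow ((s + i * H) / H + c / W) (cellv tile ((s + i * H) % H) (c % W))))).getD col none =
      some (fpow ((s + i * H) / H + col / W) (cellv tile ((s + i * H) % H) (col % W))) := by
    simp [List.getD_eq_getElem?_getD, hcol]
  rw [hgetcell]
  have hd1 : (s + i * H) / H = i := by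
    rw [Nat.add_mul_div_right _ _ hH, Nat.div_eq_of_lt hs]
    omega
  have hm1 : (s + i * H) % H = s := by
    rw [Nat.add_mul_mod_self_right, Nat.mod_eq_of_lt hs]
  have hd2 : L / H = i + 1 := by
    rw [hL, add_comm ((i + 1) * H) s, Nat.add_mul_div_right _ _ hH, Nat.div_eq_of_lt hs]
    omega
  have hm2 : L % H = s := by
    rw [hL, add_comm ((i + 1) * H) s, Nat.add_mul_mod_self_right, Nat.mod_eq_of_lt hs]
  rw [hd1, hm1, hd2, hm2]
  rw [show propagate_riskO (some (fpow (i + col / W) (cellv tile s (col % W)))) =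
      some (fpow (i + col / W + 1) (cellv tile s (col % W))) from rfl]
  rw [show i + col / W + 1 = i + 1 + col / W from by omega]

-- the phase-2 inner loop appends target rows s, s+1, ..., H-1 of block i+1
theorem phase2_inner (tile : List (List Int)) (H W i : Nat) (hH : 0 < H) :
    ∀ (k s : Nat), s + k = H →
    (List.range' s k).foldl (fun m row =>
        m ++ [(List.range (5 * W)).map
          (fun col => propagate_riskO ((m.getD (row + i * H) []).getD col none))])
      ((List.range ((i + 1) * H + s)).map (tgt tile H W)) =
    (List.range ((i + 1) * H + H)).map (tgt tile H W) := by
  intro k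
  induction k with
  | zero => intro s hs; simp only [List.range'_zero, List.foldl_nil]; rw [show s = H from by omega]
  | succ k ih =>
    intro s hs
    rw [List.range'_succ, List.foldl_cons]
    have hs' : s < H := by omega
    rw [phase2_step tile H W i s hH hs' ((i + 1) * H + s) rfl]
    rw [show (List.range ((i + 1) * H + s)).map (tgt tile H W) ++ [tgt tile H W ((i + 1) * H + s)] =
        (List.range ((i + 1) * H + s + 1)).map (tgt tile H W) from by
      rw [List.range_succ, List.map_append]; rfl]
    rw [show (i + 1) * H + s + 1 = (i + 1) * H + (s + 1) from by omega]
    exact ih (s + 1) (by omega)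

-- main equivalence
theorem propagate_eq (tile : List (List Int)) (hpre : Pre_propagate tile) :
    propagate tile = propagate_alt tile := by
  obtain ⟨hne, hrect⟩ := hpre
  unfold propagate propagate_alt
  simp only []
  set H := tile.length with hH
  set W := (tile.getD 0 []).length with hWdef
  have hH0 : 0 < H := by
    cases tile with
    | nil => exact absurd rfl hne
    | cons a t => simp [hH]
  -- phase 1 equals the first H target rows
  have hphase1 : tile.map (fun risks =>
      (PySem.List.enumerate risks).foldl (fun rowL cr =>
        let col := cr.1.toNat
        let rowL := rowL.set col (some cr.2)
        (List.range 4).foldl (fun rl j =>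
          rl.set (col + (j + 1) * W) (propagate_riskO (rl.getD (col + j * W) none))) rowL)
        (List.replicate (W * 5) none)) = (List.range H).map (tgt tile H W) := by
    apply List.ext_getElem?
    intro r
    by_cases hr : r < H
    · have hrt : r < tile.length := hr
      rw [List.getElem?_map, List.getElem?_eq_getElem hrt]
      rw [List.getElem?_map, List.getElem?_range hr]
      simp only [Option.map_some]
      congr 1
      have hrl : tile[r].length = W := hrect tile[r] (List.getElem_mem _)
      rw [phase1_full W tile[r] hrl]
      unfold tgt
      apply List.map_congr_left
      intro c hc
      rw [Nat.div_eq_of_lt hr, Nat.mod_eq_of_lt hr, Nat.zero_add]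
      unfold cellv
      have hgd : tile.getD r [] = tile[r] := by
        rw [List.getD_eq_getElem?_getD, List.getElem?_eq_getElem hrt, Option.getD_some]
      rw [hgd]
    · rw [List.getElem?_eq_none (by simp; omega), List.getElem?_eq_none (by simp; omega)]
  rw [hphase1]
  -- phase 2 yields all 5H target rows
  have h4 : List.range 4 = [0, 1, 2, 3] := by decide
  rw [h4]
  simp only [List.foldl_cons, List.foldl_nil]
  have step : ∀ i : Nat,
      (List.range H).foldl (fun m row =>
        m ++ [(List.range (5 * W)).map
          (fun col => propagate_riskO ((m.getD (row + i * H) []).getD col none))])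
        ((List.range ((i + 1) * H)).map (tgt tile H W)) =
      (List.range ((i + 2) * H)).map (tgt tile H W) := by
    intro i
    have h2 := phase2_inner tile H W i hH0 H 0 (by omega)
    rw [Nat.add_zero] at h2
    rw [← List.range_eq_range'] at h2
    rw [h2, show (i + 1) * H + H = (i + 2) * H from by ring]
  rw [show (List.range H).map (tgt tile H W) = (List.range ((0 + 1) * H)).map (tgt tile H W) from by norm_num]
  rw [step 0, show (0 + 2) * H = (1 + 1) * H from by ring, step 1,
      show (1 + 2) * H = (2 + 1) * H from by ring, step 2,
      show (2 + 2) * H = (3 + 1) * H from by ring, step 3,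
      show (3 + 2) * H = 5 * H from by ring]
  -- unwrap the options and compare with B cell by cell
  rw [List.map_map]
  apply List.map_congr_left
  intro r hr
  rw [List.mem_range] at hr
  simp only [Function.comp]
  unfold tgt
  rw [List.map_map]
  apply List.map_congr_left
  intro c hc
  simp only [Function.comp, Option.getD_some]
  rw [foldl_bump_fpow]
  rfl

-- ===== VERDICT (by name: the statement is the Claim_ definition above) =====
theorem propagate_spec : Claim_equal_propagate := by
  intro tile _ hpre
  exact propagate_eq tile hpre
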